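-- pv_equiv track=rewrite | github.com/jsymons/itp-class | unit-9-advanced-control-flow/lesson-4-variable-size-box/solutions/simple_variable_box_solution.py | variable_size_box
-- ===== SOURCE A (Python) =====
-- def variable_size_box(size=4, char='*'):
--     box = ''
--     for i in range(size):
--         row = ''
--         for j in range(size):
--             row += char
--         row += '\n'
--         box += row
--     return box
-- ===== SOURCE B (Python) =====
-- def variable_size_box(size=4, char='*'):
--     return (char * size + '\n') * size
-- ===== Notes on version B (the rewrite author's own statement) =====
-- stated objective: idiomatic
-- what changed: Replaced the nested character-accumulation loops with the closed-form string expression (char * size + '\n') * size.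
import Mathlib
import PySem

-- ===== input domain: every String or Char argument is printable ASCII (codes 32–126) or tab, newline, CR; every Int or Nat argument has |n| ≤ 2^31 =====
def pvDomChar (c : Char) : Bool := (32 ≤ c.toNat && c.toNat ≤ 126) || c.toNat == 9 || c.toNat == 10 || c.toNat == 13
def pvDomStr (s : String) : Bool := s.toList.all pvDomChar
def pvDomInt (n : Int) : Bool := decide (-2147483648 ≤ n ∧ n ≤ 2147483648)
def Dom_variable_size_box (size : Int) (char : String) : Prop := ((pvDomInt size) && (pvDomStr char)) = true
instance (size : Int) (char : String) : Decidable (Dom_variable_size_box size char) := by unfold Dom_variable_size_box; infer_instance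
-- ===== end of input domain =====

-- B replaces the nested loops with the closed-form string expression (char * size + '\n') * size (idiomatic).


-- ===== PORT A =====
-- Python string concatenation is ported as List Char concatenation (exact), with String.ofList at the end.
def variable_size_box (size : Int) (char : String) : String :=
  String.ofList ((PySem.List.pyRange 0 size 1).foldl (fun box _i =>
    let row := (PySem.List.pyRange 0 size 1).foldl (fun r _j => r ++ char.toList) ([] : List Char)
    box ++ (row ++ ['\n'])) [])

-- ===== PORT B =====
-- char * size and s * size are PySem.List.pyRepeat on the character lists (exact).
def variable_size_box_alt (size : Int) (char : String) : String :=
  String.ofList (PySem.List.pyRepeat (PySem.List.pyRepeat char.toList size ++ ['\n']) size)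

-- ===== PRECONDITION & SPEC =====
def Spec_variable_size_box (size : Int) (char : String) (out : String) : Prop := out = variable_size_box_alt size char
instance (size : Int) (char : String) (out : String) : Decidable (Spec_variable_size_box size char out) := by unfold Spec_variable_size_box; infer_instance

-- ===== CLAIM (what is proved, stated in full; the proofs are below) =====
def Claim_equal_variable_size_box : Prop := ∀ (size : Int) (char : String), Dom_variable_size_box size char → Spec_variable_size_box size char (variable_size_box size char)

-- ===== LEMMAS AND PROOFS =====

-- a foldl that only appends a fixed chunk each step is init ++ (chunk replicated)
theorem foldl_append_const {α β : Type} (l : List β) (chunk : List α) (init : List α) :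
    l.foldl (fun r (_ : β) => r ++ chunk) init = init ++ (List.replicate l.length chunk).flatten := by
  induction l generalizing init with
  | nil => simp
  | cons x xs ih => simp [List.foldl, ih, List.replicate, List.append_assoc]

-- ===== VERDICT (by name: the statement is the Claim_ definition above) =====
theorem variable_size_box_spec : Claim_equal_variable_size_box := by
  intro size char _
  show _ = _
  unfold variable_size_box variable_size_box_alt PySem.List.pyRepeat
  congr 1
  rw [foldl_append_const, foldl_append_const]
  simp [PySem.List.length_pyRange_one]
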